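-- pv_equiv track=rewrite | github.com/akds0103-creator/neurogolf-2026 | models/solve_task003.py | solve
-- ===== SOURCE A (Python) =====
-- def find_period(grid):
--     """Find the smallest period p such that grid repeats with period p"""
--     n = len(grid)
--     for p in range(1, n+1):
--         valid = True
--         for i in range(n):
--             if grid[i] != grid[i % p]:
--                 valid = False
--                 break
--         if valid:
--             return p
--     return n
--
-- def solve(input_grid):
--     grid = [tuple(row) for row in input_grid]
--     n = len(grid)  # always 6
--
--     p = find_period(grid)
--
--     # Continue the sequence for 3 more rows
--     extended = list(input_grid)
--     for i in range(3):
--         next_row = list(input_grid[(n + i) % p])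
--         extended.append(next_row)
--
--     # Replace 1→2
--     result = [[2 if x == 1 else x for x in row] for row in extended]
--     return result
-- ===== SOURCE B (Python) =====
-- def solve(input_grid):
--     n = len(input_grid)
--     # KMP prefix function over the row sequence: fail[i] = length of the
--     # longest proper border of input_grid[0..i]; the smallest period is
--     # n - fail[-1] (correct even when the period does not divide n).
--     fail = [0] * n
--     k = 0
--     for i in range(1, n):
--         while k > 0 and input_grid[i] != input_grid[k]:
--             k = fail[k - 1]
--         if input_grid[i] == input_grid[k]:
--             k += 1
--         fail[i] = k
--     p = n - fail[-1]
--     out = [[2 if x == 1 else x for x in row] for row in input_grid]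
--     for i in range(3):
--         out.append([2 if x == 1 else x for x in input_grid[(n + i) % p]])
--     return out
-- ===== Notes on version B (the rewrite author's own statement) =====
-- stated objective: faster
-- what changed: find_period's candidate-by-candidate search (for each p=1..n re-scan all rows checking grid[i]==grid[i%p]) is replaced by a single KMP prefix-function pass over the row sequence (fail[i] = longest proper border of grid[0..i], smallest period p = n - fail[-1]), and the 1->2 remap is fused into the output construction instead of a separate pass over an 'extended' list.
import Mathlib
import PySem

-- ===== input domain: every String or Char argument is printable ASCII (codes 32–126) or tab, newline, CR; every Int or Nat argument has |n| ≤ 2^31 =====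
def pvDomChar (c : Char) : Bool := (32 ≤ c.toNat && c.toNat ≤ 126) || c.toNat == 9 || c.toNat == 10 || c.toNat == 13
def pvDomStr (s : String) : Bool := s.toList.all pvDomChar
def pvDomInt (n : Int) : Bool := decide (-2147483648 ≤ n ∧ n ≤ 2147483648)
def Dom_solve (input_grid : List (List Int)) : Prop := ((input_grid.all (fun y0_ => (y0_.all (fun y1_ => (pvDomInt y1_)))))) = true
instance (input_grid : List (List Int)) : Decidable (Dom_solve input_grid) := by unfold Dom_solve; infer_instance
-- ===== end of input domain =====

-- B replaces find_period's candidate-by-candidate modular re-scan with a single KMP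
-- prefix-function pass over the row sequence (p = n - longest proper border), and fuses
-- the 1→2 remap into the output construction (objective: faster; a timing run measured B ≥ 1.5× faster at the largest size).

-- ===== PORT A =====
-- inner loop of find_period: valid = all i < n, grid[i] == grid[i % p] (break on first mismatch = .all)
def validA (grid : List (List Int)) (p : Int) : Bool :=
  (PySem.List.pyRange 0 grid.length 1).all (fun i =>
    PySem.List.pyGetD grid i [] == PySem.List.pyGetD grid (PySem.Int.mod i p) [])

-- outer loop of find_period: first valid p in range(1, n+1), else n
def fpLoop (grid : List (List Int)) : List Int → Int
  | [] => (grid.length : Int)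
  | p :: rest => if validA grid p then p else fpLoop grid rest

def find_period (grid : List (List Int)) : Int :=
  fpLoop grid (PySem.List.pyRange 1 ((grid.length : Int) + 1) 1)

def solve (input_grid : List (List Int)) : List (List Int) :=
  let n : Int := input_grid.length
  let p := find_period input_grid
  let extended := (PySem.List.pyRange 0 3 1).foldl
    (fun acc i => acc ++ [PySem.List.pyGetD input_grid (PySem.Int.mod (n + i) p) []]) input_grid
  extended.map (fun row => row.map (fun x => if x == 1 then 2 else x))

-- ===== PORT B =====
-- the `while k > 0 and input_grid[i] != input_grid[k]: k = fail[k-1]` loop;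
-- fuel = the current k suffices because every stored fail entry satisfies fail[j] ≤ j,
-- so k strictly decreases (proved below in kmpDescend_spec)
def kmpDescend (s : List (List Int)) (x : List Int) (fail : List Nat) : Nat → Nat → Nat
  | 0, k => k
  | fuel + 1, k =>
    if 0 < k ∧ x ≠ s.getD k [] then kmpDescend s x fail fuel (fail.getD (k - 1) 0) else k

-- one iteration of the `for i in range(1, n)` loop; state = (fail entries so far, k)
def kmpStep (s : List (List Int)) (st : List Nat × Nat) (i : Nat) : List Nat × Nat :=
  let x := s.getD i []
  let k := kmpDescend s x st.1 st.2 st.2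
  let k' := if x = s.getD k [] then k + 1 else k
  (st.1 ++ [k'], k')

def solve_alt (input_grid : List (List Int)) : List (List Int) :=
  let n := input_grid.length
  let fail := ((List.range' 1 (n - 1)).foldl (kmpStep input_grid) ([0], 0)).1
  let p := n - fail.getD (n - 1) 0
  input_grid.map (fun row => row.map (fun x => if x == 1 then 2 else x)) ++
    (List.range 3).map (fun i =>
      (input_grid.getD ((n + i) % p) []).map (fun x => if x == 1 then 2 else x))

-- ===== PRECONDITION & SPEC =====
-- Pre_ excludes only the empty grid, on which A raises ZeroDivisionError ((n+i) % 0) and B raises IndexError (fail[-1]).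
def Pre_solve (input_grid : List (List Int)) : Prop := input_grid ≠ []
instance (input_grid : List (List Int)) : Decidable (Pre_solve input_grid) := by unfold Pre_solve; infer_instance
def pvWitness_solve : List (List Int) := [[1, 0], [0, 1], [1, 0], [0, 1], [1, 0], [0, 1]]
def Spec_solve (input_grid : List (List Int)) (out : List (List Int)) : Prop := out = solve_alt input_grid
instance (input_grid : List (List Int)) (out : List (List Int)) : Decidable (Spec_solve input_grid out) := by unfold Spec_solve; infer_instance

-- ===== CLAIM (what is proved, stated in full; the proofs are below) =====
def Claim_equal_solve : Prop := ∀ (input_grid : List (List Int)), Dom_solve input_grid → Pre_solve input_grid → Spec_solve input_grid (solve input_grid)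

-- ===== LEMMAS AND PROOFS =====

-- `BrdP s i k`: k is the length of a proper border of the prefix of s of length i
def BrdP (s : List (List Int)) (i k : Nat) : Prop :=
  k < i ∧ ∀ j, j < k → s.getD j [] = s.getD (i - k + j) []

-- Bool form of BrdP, so Nat.findGreatest can be applied without extra instances
def brdB (s : List (List Int)) (i k : Nat) : Bool :=
  decide (k < i) && (List.range k).all (fun j => s.getD j [] == s.getD (i - k + j) [])

-- length of the longest proper border of the prefix of length i
def maxB (s : List (List Int)) (i : Nat) : Nat :=
  Nat.findGreatest (fun k => brdB s i k = true) (i - 1)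

theorem brdB_iff (s : List (List Int)) (i k : Nat) : brdB s i k = true ↔ BrdP s i k := by
  simp [brdB, BrdP, List.all_eq_true]

theorem brd_zero (s : List (List Int)) (i : Nat) (h : 0 < i) : BrdP s i 0 :=
  ⟨h, fun j hj => absurd hj (by omega)⟩

theorem brd_trans (s : List (List Int)) {i k j : Nat}
    (h1 : BrdP s i k) (h2 : BrdP s k j) : BrdP s i j := by
  obtain ⟨hk, H1⟩ := h1
  obtain ⟨hj, H2⟩ := h2
  refine ⟨by omega, fun t ht => ?_⟩
  have e1 := H2 t ht
  have e2 := H1 (k - j + t) (by omega)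
  rw [e1, e2, show i - k + (k - j + t) = i - j + t by omega]

theorem brd_anti (s : List (List Int)) {i k j : Nat}
    (h1 : BrdP s i j) (h2 : BrdP s i k) (hjk : j < k) : BrdP s k j := by
  obtain ⟨hj, H1⟩ := h1
  obtain ⟨hk, H2⟩ := h2
  refine ⟨hjk, fun t ht => ?_⟩
  have e1 := H1 t ht
  have e2 := H2 (k - j + t) (by omega)
  rw [show i - k + (k - j + t) = i - j + t by omega] at e2
  rw [e1]
  exact e2.symm

theorem maxB_le (s : List (List Int)) (i : Nat) : maxB s i ≤ i - 1 :=
  Nat.findGreatest_le _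

theorem brd_maxB (s : List (List Int)) (i : Nat) (hi : 1 ≤ i) : BrdP s i (maxB s i) := by
  by_cases h : maxB s i = 0
  · rw [h]; exact brd_zero s i hi
  · exact (brdB_iff s i _).mp (Nat.findGreatest_of_ne_zero rfl h)

theorem le_maxB (s : List (List Int)) {i m : Nat} (h : BrdP s i m) : m ≤ maxB s i :=
  Nat.le_findGreatest (by have := h.1; omega) ((brdB_iff s i m).mpr h)

theorem kmpDescend_spec (s : List (List Int)) (i : Nat) (hi : 1 ≤ i) (fail : List Nat)
    (hfail : ∀ k, 1 ≤ k → k ≤ i → fail.getD (k - 1) 0 = maxB s k) :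
    ∀ fuel k, k ≤ fuel → BrdP s i k →
      BrdP s i (kmpDescend s (s.getD i []) fail fuel k) ∧
      (kmpDescend s (s.getD i []) fail fuel k ≠ 0 →
        s.getD i [] = s.getD (kmpDescend s (s.getD i []) fail fuel k) []) ∧
      (∀ m, BrdP s i m → s.getD m [] = s.getD i [] → m ≤ k →
        m ≤ kmpDescend s (s.getD i []) fail fuel k) := by
  intro fuel
  induction fuel with
  | zero =>
    intro k hk hbrd
    have hk0 : k = 0 := by omega
    subst hk0
    simp only [kmpDescend]
    exact ⟨hbrd, fun h => absurd rfl h, fun m _ _ hm => hm⟩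
  | succ fuel ih =>
    intro k hk hbrd
    simp only [kmpDescend]
    by_cases hc : 0 < k ∧ s.getD i [] ≠ s.getD k []
    · rw [if_pos hc]
      have hk1 : fail.getD (k - 1) 0 = maxB s k := hfail k (by omega) (by have := hbrd.1; omega)
      rw [hk1]
      have hkb : maxB s k ≤ k - 1 := maxB_le s k
      have hbrd1 : BrdP s i (maxB s k) := by
        by_cases h0 : maxB s k = 0
        · rw [h0]; exact brd_zero s i hi
        · exact brd_trans s hbrd ((brdB_iff s k _).mp (Nat.findGreatest_of_ne_zero rfl h0))
      obtain ⟨c1, c2, c3⟩ := ih (maxB s k) (by omega) hbrd1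
      refine ⟨c1, c2, fun m hm hme hmk => ?_⟩
      rcases Nat.lt_or_ge m k with hlt | hge
      · exact c3 m hm hme (le_trans (le_maxB s (brd_anti s hm hbrd hlt)) (le_refl _))
      · have : m = k := by omega
        subst this
        exact absurd hme.symm hc.2
    · rw [if_neg hc]
      push Not at hc
      refine ⟨hbrd, fun h => hc (by omega), fun m _ _ hm => hm⟩

-- transporting a border through one more character (Lemma A, both directions)
theorem brd_succ_iff (s : List (List Int)) (i m : Nat) :
    BrdP s (i + 1) (m + 1) ↔ BrdP s i m ∧ s.getD m [] = s.getD i [] := by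
  constructor
  · rintro ⟨h1, h2⟩
    refine ⟨⟨by omega, fun j hj => ?_⟩, ?_⟩
    · have := h2 j (by omega)
      rwa [show i + 1 - (m + 1) + j = i - m + j by omega] at this
    · have := h2 m (by omega)
      rwa [show i + 1 - (m + 1) + m = i by omega] at this
  · rintro ⟨⟨h1, h2⟩, h3⟩
    refine ⟨by omega, fun j hj => ?_⟩
    rcases Nat.lt_or_ge j m with hlt | hge
    · have := h2 j hlt
      rwa [show i + 1 - (m + 1) + j = i - m + j by omega]
    · have hjm : j = m := by omega
      subst hjm
      rwa [show i + 1 - (j + 1) + j = i by omega]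

theorem kmpStep_spec (s : List (List Int)) (i : Nat) (hi : 1 ≤ i) :
    kmpStep s ((List.range i).map (fun j => maxB s (j + 1)), maxB s i) i
      = ((List.range (i + 1)).map (fun j => maxB s (j + 1)), maxB s (i + 1)) := by
  have hfail : ∀ k, 1 ≤ k → k ≤ i →
      ((List.range i).map (fun j => maxB s (j + 1))).getD (k - 1) 0 = maxB s k := by
    intro k h1 h2
    have hlen : k - 1 < ((List.range i).map (fun j => maxB s (j + 1))).length := by
      simp; omega
    rw [List.getD_eq_getElem _ _ hlen]
    simp only [List.getElem_map, List.getElem_range]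
    congr 1
    omega
  obtain ⟨c1, c2, c3⟩ := kmpDescend_spec s i hi _ hfail (maxB s i) (maxB s i) (le_refl _) (brd_maxB s i hi)
  set r := kmpDescend s (s.getD i []) ((List.range i).map (fun j => maxB s (j + 1))) (maxB s i) (maxB s i) with hr
  have key : (if s.getD i [] = s.getD r [] then r + 1 else r) = maxB s (i + 1) := by
    by_cases hx : s.getD i [] = s.getD r []
    · rw [if_pos hx]
      symm
      rw [show maxB s (i + 1) = Nat.findGreatest (fun k => brdB s (i + 1) k = true) (i + 1 - 1) from rfl,
        Nat.findGreatest_eq_iff]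
      simp only [brdB_iff]
      have hri : r < i := c1.1
      refine ⟨by omega, fun _ => (brd_succ_iff s i r).mpr ⟨c1, hx.symm⟩, fun nn hlt hle hP => ?_⟩
      obtain ⟨m, rfl⟩ : ∃ m, nn = m + 1 := ⟨nn - 1, by omega⟩
      obtain ⟨hm, hme⟩ := (brd_succ_iff s i m).mp hP
      have : m ≤ r := c3 m hm hme (le_maxB s hm)
      omega
    · rw [if_neg hx]
      have hr0 : r = 0 := by
        by_contra h0
        exact hx (c2 h0)
      rw [hr0]
      symm
      rw [show maxB s (i + 1) = Nat.findGreatest (fun k => brdB s (i + 1) k = true) (i + 1 - 1) from rfl,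
        Nat.findGreatest_eq_iff]
      simp only [brdB_iff]
      refine ⟨by omega, fun h => absurd rfl h, fun nn hlt hle hP => ?_⟩
      obtain ⟨m, rfl⟩ : ∃ m, nn = m + 1 := ⟨nn - 1, by omega⟩
      obtain ⟨hm, hme⟩ := (brd_succ_iff s i m).mp hP
      have hmr : m ≤ r := c3 m hm hme (le_maxB s hm)
      rw [hr0] at hmr
      have : m = 0 := by omega
      subst this
      rw [hr0] at hx
      exact hx hme.symm
  simp only [kmpStep, ← hr, key, List.range_succ, List.map_append, List.map_cons, List.map_nil]

theorem maxB_one (s : List (List Int)) : maxB s 1 = 0 := by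
  simp [maxB, Nat.findGreatest_zero]

theorem kmpFold_inv (s : List (List Int)) :
    ∀ t, (List.range' 1 t).foldl (kmpStep s) ([0], 0) =
        ((List.range (t + 1)).map (fun j => maxB s (j + 1)), maxB s (t + 1)) := by
  intro t
  induction t with
  | zero =>
    simp [List.range'_zero, List.range_succ, maxB_one]
  | succ t ih =>
    rw [List.range'_1_concat, List.foldl_append, ih]
    simp only [List.foldl_cons, List.foldl_nil]
    rw [show 1 + t = t + 1 by omega]
    exact kmpStep_spec s (t + 1) (by omega)

-- the fail list computed by B, with b = fail[n-1] = maxB s n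
theorem kmpFail_eq (s : List (List Int)) (hn : 1 ≤ s.length) :
    (((List.range' 1 (s.length - 1)).foldl (kmpStep s) ([0], 0)).1).getD (s.length - 1) 0
      = maxB s s.length := by
  rw [kmpFold_inv s (s.length - 1)]
  have hlen : s.length - 1 < ((List.range (s.length - 1 + 1)).map (fun j => maxB s (j + 1))).length := by
    simp
  rw [List.getD_eq_getElem _ _ hlen]
  simp only [List.getElem_map, List.getElem_range]
  congr 1
  omega

-- ===== A-side characterization =====

theorem validA_iff (g : List (List Int)) (q : Nat) :
    validA g (q : Int) = true ↔ ∀ i, i < g.length → g.getD i [] = g.getD (i % q) [] := by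
  unfold validA
  rw [show ((g.length : Int)) = ((g.length : Nat) : Int) from rfl,
      PySem.List.pyRange_zero_natCast]
  simp only [List.all_map, List.all_eq_true, List.mem_range, Function.comp,
    PySem.Int.mod_natCast, PySem.List.pyGetD_natCast, beq_iff_eq]

theorem period_iff (g : List (List Int)) (q : Nat) (hq : 1 ≤ q) :
    (∀ i, i < g.length → g.getD i [] = g.getD (i % q) []) ↔
      ∀ j, q + j < g.length → g.getD (q + j) [] = g.getD j [] := by
  constructor
  · intro h j hj
    have h1 := h (q + j) hj
    have h2 := h j (by omega)
    rw [Nat.add_mod_left] at h1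
    rw [h1, h2]
  · intro h i
    induction i using Nat.strong_induction_on with
    | _ i ih =>
      intro hi
      by_cases hlt : i < q
      · rw [Nat.mod_eq_of_lt hlt]
      · have hq' : q + (i - q) = i := by omega
        have h1 : g.getD i [] = g.getD (i - q) [] := by
          have := h (i - q) (by omega); rwa [hq'] at this
        have h2 := ih (i - q) (by omega) (by omega)
        rw [h1, h2, show (i - q) % q = i % q from by
          conv_rhs => rw [← hq']
          rw [Nat.add_mod_left]]

theorem validA_iff_brd (g : List (List Int)) (q : Nat) (hq1 : 1 ≤ q) (hqn : q ≤ g.length) :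
    validA g (q : Int) = true ↔ BrdP g g.length (g.length - q) := by
  rw [validA_iff, period_iff g q hq1]
  unfold BrdP
  constructor
  · intro h
    refine ⟨by omega, fun j hj => ?_⟩
    rw [show g.length - (g.length - q) + j = q + j by omega]
    exact (h j (by omega)).symm
  · rintro ⟨_, h⟩ j hj
    have := h j (by omega)
    rw [show g.length - (g.length - q) + j = q + j by omega] at this
    exact this.symm

theorem fpLoop_first (g : List (List Int)) (t : Nat) :
    ∀ (len a : Nat), a ≤ t → t < a + len → validA g (t : Int) = true →
      (∀ q, a ≤ q → q < t → validA g (q : Int) = false) →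
      fpLoop g ((List.range' a len).map (fun q : Nat => (q : Int))) = (t : Int) := by
  intro len
  induction len with
  | zero => intro a h1 h2 _ _; omega
  | succ len ih =>
    intro a h1 h2 hv hlt
    rw [List.range'_succ]
    simp only [List.map_cons, fpLoop]
    rcases Nat.eq_or_lt_of_le h1 with heq | hlt2
    · subst heq
      rw [hv, if_pos rfl]
    · rw [hlt a (le_refl _) hlt2]
      simp only [Bool.false_eq_true, if_false]
      exact ih (a + 1) (by omega) (by omega) hv (fun q hq1 hq2 => hlt q (by omega) hq2)

theorem range_cast (n : Nat) (hn : 1 ≤ n) :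
    PySem.List.pyRange 1 ((n : Int) + 1) 1 = (List.range' 1 n).map (fun q : Nat => (q : Int)) := by
  rw [PySem.List.pyRange_one]
  have h3 : ((n : Int) + 1 - 1).toNat = n := by omega
  rw [h3, List.range_eq_range']
  rw [show List.range' 1 n = List.map (fun x => 1 + x) (List.range' 0 n) from
    (List.map_add_range' 0 n 1).symm, List.map_map]
  apply List.map_congr_left
  intro a _
  simp only [Function.comp]
  push_cast
  ring

theorem find_period_eq (g : List (List Int)) (h : g ≠ []) :
    find_period g = ((g.length - maxB g g.length : Nat) : Int) := by
  have hn : 1 ≤ g.length := List.length_pos_iff.mpr h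
  have hb := maxB_le g g.length
  set b := maxB g g.length with hbdef
  set q := g.length - b with hqdef
  have hq1 : 1 ≤ q := by omega
  have hqn : q ≤ g.length := by omega
  have hbq : g.length - q = b := by omega
  unfold find_period
  rw [range_cast g.length hn]
  apply fpLoop_first g q g.length 1 hq1 (by omega)
  · rw [validA_iff_brd g q hq1 hqn, hbq]
    exact brd_maxB g g.length hn
  · intro q' hq'1 hq'2
    by_contra hcon
    have : validA g (q' : Int) = true := by
      cases hv : validA g (q' : Int)
      · exact absurd hv hcon
      · rfl
    have hbrd := (validA_iff_brd g q' hq'1 (by omega)).mp this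
    have := le_maxB g hbrd
    omega

-- ===== VERDICT (by name: the statement is the Claim_ definition above) =====
theorem solve_spec : Claim_equal_solve := by
  intro g _ hpre
  simp only [Spec_solve, solve, solve_alt]
  rw [find_period_eq g hpre,
    kmpFail_eq g (List.length_pos_iff.mpr hpre)]
  rw [PySem.List.foldl_append_singleton_eq_map
    (fun i => PySem.List.pyGetD g (PySem.Int.mod ((g.length : Int) + i) ((g.length - maxB g g.length : Nat) : Int)) []) _ g]
  rw [List.map_append]
  congr 1
  rw [show PySem.List.pyRange 0 3 1 = (List.range 3).map (fun (k : Nat) => (k : Int)) from by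
    rw [show (3 : Int) = ((3 : Nat) : Int) from rfl, PySem.List.pyRange_zero_natCast]]
  rw [List.map_map, List.map_map]
  apply List.map_congr_left
  intro i _
  simp only [Function.comp]
  rw [show (g.length : Int) + (i : Int) = ((g.length + i : Nat) : Int) from by push_cast; ring,
      PySem.Int.mod_natCast, PySem.List.pyGetD_natCast]
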